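-- pv_equiv track=rewrite | github.com/cuervo0102/CodeWars | kuy7/clothes-size-number-converter.py | size_to_number
-- ===== SOURCE A (Python) =====
-- def size_to_number(size):
--     sizes = ['s', 'm', 'l']
--     if len(size) < 1 or size[-1] not in sizes:
--         return None
--     base_size = size[-1]
--     added_x = size[:-1]
--     if base_size == 'm' and len(added_x) > 0:
--         return None
--     if any(char not in 'xsml' for char in size):
--         return None
--     base_size_count = 0
--     for s in sizes:
--         base_size_count += size.count(s)
--         if base_size_count > 1:
--             return None
--     count_x = len(added_x)
--     if base_size == 's':
--         final_size = 36 - 2 * count_x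
--     elif base_size == 'm':
--         final_size = 38
--     elif base_size == 'l':
--         final_size = 40 + 2 * count_x
--     else:
--         return None
--     return final_size
-- ===== SOURCE B (Python) =====
-- def size_to_number(size):
--     # One left-to-right scan: count leading 'x's, then the remainder must be
--     # exactly 's', 'l', or (with no prefix) 'm'.
--     k = 0
--     while k < len(size) and size[k] == 'x':
--         k += 1
--     core = size[k:]
--     if core == 's':
--         return 36 - 2 * k
--     if core == 'm' and k == 0:
--         return 38
--     if core == 'l':
--         return 40 + 2 * k
--     return None
-- ===== Notes on version B (the rewrite author's own statement) =====
-- stated objective: simpler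
-- what changed: Replaces A's multi-scan validation (last-char membership, m-prefix check, any() bad-char scan, per-letter count loop with early return) by a single left-to-right scan counting leading 'x's followed by one comparison of the remainder against 's'/'m'/'l'.
import Mathlib
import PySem

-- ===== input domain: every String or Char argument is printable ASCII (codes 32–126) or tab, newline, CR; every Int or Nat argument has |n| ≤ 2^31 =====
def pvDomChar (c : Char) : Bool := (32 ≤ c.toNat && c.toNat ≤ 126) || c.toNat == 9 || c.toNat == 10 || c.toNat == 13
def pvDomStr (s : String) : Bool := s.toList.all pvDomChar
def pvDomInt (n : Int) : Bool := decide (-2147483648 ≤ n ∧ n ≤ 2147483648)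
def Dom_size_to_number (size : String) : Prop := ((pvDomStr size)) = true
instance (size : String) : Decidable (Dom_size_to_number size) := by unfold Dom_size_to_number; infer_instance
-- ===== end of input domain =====

-- B replaces A's four validation passes by one leading-'x' scan plus a remainder comparison (objective: simpler).

-- ===== PORT A =====
-- Hand port on List Char (exact here: size[-1] of a nonempty string is getLast?,
-- size[:-1] is dropLast, size.count(c) for a 1-char pattern is List.count c).

-- for s in sizes: base_size_count += size.count(s); if base_size_count > 1: return True (early return None)
def pvCountLoop : List Char → List Char → Int → Bool
  | [], _, _ => false
  | s :: rest, cs, acc =>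
      let acc' := acc + (cs.count s : Int)
      if acc' > 1 then true else pvCountLoop rest cs acc'

def pvAimpl (cs : List Char) : Option Int :=
  let sizes : List Char := ['s', 'm', 'l']
  if cs.length < 1 then none
  else
    match cs.getLast? with
    | none => none
    | some base_size =>
      if ¬ sizes.contains base_size then none
      else
        let added_x := cs.dropLast
        if base_size = 'm' ∧ added_x.length > 0 then none
        else if cs.any (fun c => ¬ (['x', 's', 'm', 'l'].contains c)) then none
        else if pvCountLoop sizes cs 0 then none
        else
          let count_x : Int := added_x.length
          if base_size = 's' then some (36 - 2 * count_x)
          else if base_size = 'm' then some 38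
          else if base_size = 'l' then some (40 + 2 * count_x)
          else none

def size_to_number (size : String) : Option Int := pvAimpl size.toList

-- ===== PORT B =====
-- while k < len(size) and size[k] == 'x': k += 1   (scan from the left)
def pvCountX : List Char → Nat
  | [] => 0
  | c :: rest => if c = 'x' then pvCountX rest + 1 else 0

def pvBimpl (cs : List Char) : Option Int :=
  let k := pvCountX cs
  let core := cs.drop k
  if core = ['s'] then some (36 - 2 * (k : Int))
  else if core = ['m'] ∧ k = 0 then some 38
  else if core = ['l'] then some (40 + 2 * (k : Int))
  else none

def size_to_number_alt (size : String) : Option Int := pvBimpl size.toList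

-- ===== PRECONDITION & SPEC =====
def Spec_size_to_number (size : String) (out : Option Int) : Prop := out = size_to_number_alt size
instance (size : String) (out : Option Int) : Decidable (Spec_size_to_number size out) := by unfold Spec_size_to_number; infer_instance

-- ===== CLAIM (what is proved, stated in full; the proofs are below) =====
def Claim_equal_size_to_number : Prop := ∀ (size : String), Dom_size_to_number size → Spec_size_to_number size (size_to_number size)

-- ===== LEMMAS AND PROOFS =====

-- the early-return count loop over ['s','m','l'] fires iff the three counts sum to more than 1
theorem pvCountLoop_eq (cs : List Char) :
    pvCountLoop ['s', 'm', 'l'] cs 0 =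
      decide (1 < (cs.count 's' : Int) + cs.count 'm' + cs.count 'l') := by
  simp only [pvCountLoop]
  split_ifs with h1 h2 h3 <;> simp <;> omega

-- the scanned prefix really is a block of 'x's
theorem pvCountX_shape (cs : List Char) :
    cs = List.replicate (pvCountX cs) 'x' ++ cs.drop (pvCountX cs) := by
  induction cs with
  | nil => rfl
  | cons c rest ih =>
    by_cases h : c = 'x'
    · subst h
      rw [show pvCountX ('x' :: rest) = pvCountX rest + 1 from by simp [pvCountX]]
      rw [List.drop_succ_cons, List.replicate_succ, List.cons_append]
      exact congrArg _ ih
    · simp [pvCountX, h]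

-- the first char after the scanned prefix is not 'x'
theorem pvCountX_stop (cs : List Char) (c : Char) (rest : List Char)
    (h : cs.drop (pvCountX cs) = c :: rest) : c ≠ 'x' := by
  induction cs with
  | nil => simp [pvCountX] at h
  | cons d tl ih =>
    by_cases hd : d = 'x'
    · subst hd
      rw [show pvCountX ('x' :: tl) = pvCountX tl + 1 from by simp [pvCountX],
        List.drop_succ_cons] at h
      exact ih h
    · rw [show pvCountX (d :: tl) = 0 from by simp [pvCountX, hd], List.drop_zero] at h
      injection h with h1 h2
      exact h1 ▸ hd

-- A on an all-'x' string (possibly empty) rejects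
theorem pvA_allx (k : Nat) : pvAimpl (List.replicate k 'x') = none := by
  cases k with
  | zero => decide
  | succ n =>
    have hlast : (List.replicate (n + 1) 'x').getLast? = some 'x' := by
      rw [List.getLast?_eq_some_iff]
      exact ⟨List.replicate n 'x', by rw [← List.replicate_succ']⟩
    simp [pvAimpl, hlast]

-- A on x^k followed by one non-'x' char computes exactly B's case split
theorem pvA_concat (k : Nat) (c : Char) :
    pvAimpl (List.replicate k 'x' ++ [c]) =
      (if c = 's' then some (36 - 2 * (k : Int))
       else if c = 'm' ∧ k = 0 then some 38
       else if c = 'l' then some (40 + 2 * (k : Int)) else none) := by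
  have hlast : (List.replicate k 'x' ++ [c]).getLast? = some c := by
    rw [List.getLast?_append_of_ne_nil _ (by simp)]; rfl
  have hdl : (List.replicate k 'x' ++ [c]).dropLast = List.replicate k 'x' :=
    List.dropLast_concat ..
  have hlen : ¬ (List.replicate k 'x' ++ [c]).length < 1 := by simp
  by_cases hc : c = 's' ∨ c = 'm' ∨ c = 'l'
  · have hany : (List.replicate k 'x' ++ [c]).any
        (fun x => ¬ (['x', 's', 'm', 'l'].contains x)) = false := by
      simp only [List.any_append, List.any_replicate]
      rcases hc with h | h | h <;> subst h <;> simp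
    have hcl : pvCountLoop ['s', 'm', 'l'] (List.replicate k 'x' ++ [c]) 0 = false := by
      rw [pvCountLoop_eq]
      simp only [List.count_append, List.count_replicate]
      rcases hc with h | h | h <;> subst h <;> simp
    rcases hc with h | h | h <;> subst h <;>
      · simp only [pvAimpl, hlast, hdl, hany, hcl]
        simp only [hlen, List.length_replicate]
        split_ifs <;> simp_all <;> omega
  · push_neg at hc
    obtain ⟨h1, h2, h3⟩ := hc
    simp only [pvAimpl, hlast]
    simp [h1, h2, h3, hlen]

-- A rejects when a non-'x' char is followed by at least one more char
theorem pvA_long (k : Nat) (c r : Char) (rest' : List Char) (hcx : c ≠ 'x') :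
    pvAimpl (List.replicate k 'x' ++ c :: r :: rest') = none := by
  have hlast : (List.replicate k 'x' ++ c :: r :: rest').getLast? = (r :: rest').getLast? := by
    rw [List.getLast?_append_of_ne_nil _ (by simp), List.getLast?_cons_cons]
  have hb : (r :: rest').getLast? = some ((r :: rest').getLast (by simp)) :=
    List.getLast?_eq_some_getLast (by simp)
  set b := (r :: rest').getLast (by simp) with hbdef
  rw [hb] at hlast
  have hlen : ¬ (List.replicate k 'x' ++ c :: r :: rest').length < 1 := by simp
  by_cases hbs : b = 's' ∨ b = 'm' ∨ b = 'l'
  case neg =>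
    push_neg at hbs
    simp only [pvAimpl, hlast]
    simp [hbs.1, hbs.2.1, hbs.2.2, hlen]
  case pos =>
    have hdll : (List.replicate k 'x' ++ c :: r :: rest').dropLast.length > 0 := by
      simp only [List.length_dropLast, List.length_append, List.length_replicate,
        List.length_cons]
      omega
    by_cases hbm : b = 'm'
    · simp only [pvAimpl, hlast]
      simp [hbm, hdll, hlen]
    · by_cases hany : (List.replicate k 'x' ++ c :: r :: rest').any
          (fun x => ¬ (['x', 's', 'm', 'l'].contains x)) = true
      · have hcont : (['s', 'm', 'l'] : List Char).contains b = true := by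
          rcases hbs with h | h | h <;> simp [h]
        simp only [pvAimpl, hlast]
        rw [if_neg hlen, if_neg (not_not_intro hcont), if_neg (fun h => hbm h.1), if_pos hany]
      · by_cases hcs : c = 's' ∨ c = 'm' ∨ c = 'l'
        · -- c and the last char are two s/m/l occurrences → the count loop fires
          have hbmem : b ∈ r :: rest' := List.getLast_mem _
          have hbcnt : 1 ≤ (r :: rest').count 's' + (r :: rest').count 'm'
              + (r :: rest').count 'l' := by
            rcases hbs with h | h | h <;>
              · have := List.count_pos_iff.mpr (h ▸ hbmem); omega
          have hcl : pvCountLoop ['s', 'm', 'l'] (List.replicate k 'x' ++ c :: r :: rest') 0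
              = true := by
            rw [pvCountLoop_eq]
            simp only [List.count_append, List.count_replicate, decide_eq_true_eq]
            rcases hcs with h | h | h <;> subst h
            · have e1 : List.count 's' ('s' :: r :: rest') = List.count 's' (r :: rest') + 1 :=
                List.count_cons_self ..
              have e2 : List.count 'm' ('s' :: r :: rest') = List.count 'm' (r :: rest') :=
                List.count_cons_of_ne (by decide)
              have e3 : List.count 'l' ('s' :: r :: rest') = List.count 'l' (r :: rest') :=
                List.count_cons_of_ne (by decide)
              simp only [e1, e2, e3]
              push_cast
              omega
            · have e1 : List.count 's' ('m' :: r :: rest') = List.count 's' (r :: rest') :=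
                List.count_cons_of_ne (by decide)
              have e2 : List.count 'm' ('m' :: r :: rest') = List.count 'm' (r :: rest') + 1 :=
                List.count_cons_self ..
              have e3 : List.count 'l' ('m' :: r :: rest') = List.count 'l' (r :: rest') :=
                List.count_cons_of_ne (by decide)
              simp only [e1, e2, e3]
              push_cast
              omega
            · have e1 : List.count 's' ('l' :: r :: rest') = List.count 's' (r :: rest') :=
                List.count_cons_of_ne (by decide)
              have e2 : List.count 'm' ('l' :: r :: rest') = List.count 'm' (r :: rest') :=
                List.count_cons_of_ne (by decide)
              have e3 : List.count 'l' ('l' :: r :: rest') = List.count 'l' (r :: rest') + 1 :=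
                List.count_cons_self ..
              simp only [e1, e2, e3]
              push_cast
              omega
          have hcont : (['s', 'm', 'l'] : List Char).contains b = true := by
            rcases hbs with h | h | h <;> simp [h]
          have hanyf : ¬ ((List.replicate k 'x' ++ c :: r :: rest').any
              (fun x => ¬ (['x', 's', 'm', 'l'].contains x)) = true) := hany
          simp only [pvAimpl, hlast]
          rw [if_neg hlen, if_neg (not_not_intro hcont), if_neg (fun h => hbm h.1),
            if_neg hanyf, if_pos hcl]
        · -- c is a bad char → the any() scan fires: contradiction with hany
          exfalso
          apply hany
          push_neg at hcs
          simp only [List.any_append, List.any_cons, Bool.or_eq_true]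
          refine Or.inr (Or.inl ?_)
          simp [hcx, hcs.1, hcs.2.1, hcs.2.2]

theorem pvMain (cs : List Char) : pvAimpl cs = pvBimpl cs := by
  have hshape := pvCountX_shape cs
  cases hcc : cs.drop (pvCountX cs) with
  | nil =>
    rw [hcc, List.append_nil] at hshape
    have hB : pvBimpl cs = none := by
      simp only [pvBimpl, hcc]
      rw [if_neg (show ¬ (([] : List Char) = ['s']) by decide)]
      rw [if_neg (show ¬ ((([] : List Char) = ['m']) ∧ pvCountX cs = 0) from
        fun h => absurd h.1 (by decide))]
      rw [if_neg (show ¬ (([] : List Char) = ['l']) by decide)]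
    rw [hB, hshape, pvA_allx]
  | cons c rest =>
    have hcx : c ≠ 'x' := pvCountX_stop cs c rest hcc
    rw [hcc] at hshape
    cases hr : rest with
    | nil =>
      rw [hr] at hshape
      have hBval : pvBimpl cs =
          (if c = 's' then some (36 - 2 * (pvCountX cs : Int))
           else if c = 'm' ∧ pvCountX cs = 0 then some 38
           else if c = 'l' then some (40 + 2 * (pvCountX cs : Int)) else none) := by
        rw [hr] at hcc
        clear hshape
        simp only [pvBimpl, hcc]
        split_ifs with h1 h2 h3 h4 h5 h6 h7 <;> simp_all
      rw [hBval]
      conv_lhs => rw [hshape]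
      rw [pvA_concat]
    | cons r rest' =>
      have hBnone : pvBimpl cs = none := by
        rw [hr] at hcc
        simp only [pvBimpl, hcc]
        rw [if_neg (show ¬ (c :: r :: rest' = ['s']) by simp)]
        rw [if_neg (show ¬ ((c :: r :: rest' = ['m']) ∧ pvCountX cs = 0) from
          fun h => absurd h.1 (by simp))]
        rw [if_neg (show ¬ (c :: r :: rest' = ['l']) by simp)]
      rw [hr] at hshape
      rw [hBnone]
      conv_lhs => rw [hshape]
      rw [pvA_long _ _ _ _ hcx]

-- ===== VERDICT (by name: the statement is the Claim_ definition above) =====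
theorem size_to_number_spec : Claim_equal_size_to_number := by
  intro size _
  unfold Spec_size_to_number size_to_number size_to_number_alt
  exact pvMain size.toList
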